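-- pv_equiv track=rewrite | github.com/Fcardoso-AIML/compliance-document-intelligence | src/compliance_llm/rag/retriever.py | answer_from_context
-- ===== SOURCE A (Python) =====
-- from typing import List, Dict
--
-- def answer_from_context(question: str, contexts: List[Dict]) -> str:
--     if not contexts:
--         return "No evidence found."
--     best = contexts[0]["text"]
--     q_terms = set(question.lower().split())
--     sentences = [s.strip() for s in best.split(".") if s.strip()]
--     if not sentences:
--         return best[:240]
--     scored = []
--     for s in sentences:
--         overlap = len(q_terms.intersection(set(s.lower().split())))
--         scored.append((overlap, s))
--     scored.sort(reverse=True)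
--     return scored[0][1]
-- ===== SOURCE B (Python) =====
-- def answer_from_context(question, contexts):
--     if not contexts:
--         return "No evidence found."
--     best = contexts[0]["text"]
--     q_terms = set(question.lower().split())
--     best_key = None
--     for raw in best.split("."):
--         s = raw.strip()
--         if not s:
--             continue
--         s_words = set(s.lower().split())
--         overlap = sum(1 for w in q_terms if w in s_words)
--         key = (overlap, s)
--         if best_key is None or best_key < key:
--             best_key = key
--     if best_key is None:
--         return best[:240]
--     return best_key[1]
-- ===== Notes on version B (the rewrite author's own statement) =====
-- stated objective: simpler
-- what changed: Replaces the build-score-list-then-sort(reverse=True) selection with a single streaming pass that strips, scores and keeps the current best (overlap, sentence) tuple, so no scored list and no sort are materialised; Pre_ only excludes a first context without a 'text' key, where A (and B) raise KeyError.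
import Mathlib
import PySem

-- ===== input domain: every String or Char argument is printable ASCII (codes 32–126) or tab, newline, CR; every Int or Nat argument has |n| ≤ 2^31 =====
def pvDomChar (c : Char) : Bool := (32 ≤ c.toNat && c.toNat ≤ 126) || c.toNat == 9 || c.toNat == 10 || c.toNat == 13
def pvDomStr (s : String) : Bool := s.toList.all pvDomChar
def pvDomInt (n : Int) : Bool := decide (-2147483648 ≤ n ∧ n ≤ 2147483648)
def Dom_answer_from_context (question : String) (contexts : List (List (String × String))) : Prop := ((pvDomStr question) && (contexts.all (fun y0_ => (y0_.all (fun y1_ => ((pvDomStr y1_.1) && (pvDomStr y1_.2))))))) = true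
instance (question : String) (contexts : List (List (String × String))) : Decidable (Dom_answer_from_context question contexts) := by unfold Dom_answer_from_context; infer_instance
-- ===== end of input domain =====

-- B replaces A's build-scored-list-then-sort(reverse=True) selection with one streaming
-- pass keeping the current best (overlap, sentence) tuple; equal return values on Pre_.

-- ===== PORT A =====
-- overlap = len(q_terms.intersection(set(s.lower().split())))
def pvOverlapA (qTerms : PySem.Set String) (s : String) : Int :=
  PySem.Set.len (PySem.Set.inter qTerms (PySem.Set.ofList (PySem.Str.split₀ (PySem.Str.lower s))))

def answer_from_context (question : String) (contexts : List (List (String × String))) : String :=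
  match contexts with
  | [] => "No evidence found."
  | c0 :: _ =>
    match (PySem.Dict.mk c0).get? "text" with
    | none => ""  -- Python raises KeyError here; excluded by Pre_
    | some best =>
      let qTerms := PySem.Set.ofList (PySem.Str.split₀ (PySem.Str.lower question))
      let sentences := ((PySem.Str.split? best ".").getD []).filterMap
        (fun s => let t := PySem.Str.strip s; if t = "" then none else some t)
      if sentences = [] then PySem.Str.slice best none (some 240)
      else
        let scored := sentences.map (fun s => (pvOverlapA qTerms s, s))
        match PySem.List.sorted2 scored Prod.fst Prod.snd true with
        | [] => ""  -- unreachable: scored is nonempty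
        | (_, s) :: _ => s

-- ===== PORT B =====
-- Python tuple comparison best_key < key on (int, str)
def pvTupLt (a b : Int × String) : Bool :=
  decide (a.1 < b.1) || (decide (a.1 = b.1) && decide (a.2 < b.2))

-- 'if best_key is None or best_key < key: best_key = key'
def pvBestStep (acc : Option (Int × String)) (key : Int × String) : Option (Int × String) :=
  match acc with
  | none => some key
  | some b => if pvTupLt b key then some key else some b

-- overlap = sum(1 for w in q_terms if w in s_words)
def pvOverlapB (qTerms : PySem.Set String) (sWords : PySem.Set String) : Int :=
  qTerms.foldl (fun n w => if PySem.Set.contains sWords w then n + 1 else n) 0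

def answer_from_context_alt (question : String) (contexts : List (List (String × String))) : String :=
  match contexts with
  | [] => "No evidence found."
  | c0 :: _ =>
    match (PySem.Dict.mk c0).get? "text" with
    | none => ""  -- Python raises KeyError here; excluded by Pre_
    | some best =>
      let qTerms := PySem.Set.ofList (PySem.Str.split₀ (PySem.Str.lower question))
      let bestKey := ((PySem.Str.split? best ".").getD []).foldl
        (fun acc raw =>
          let s := PySem.Str.strip raw
          if s = "" then acc
          else pvBestStep acc
            (pvOverlapB qTerms (PySem.Set.ofList (PySem.Str.split₀ (PySem.Str.lower s))), s))
        none
      match bestKey with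
      | none => PySem.Str.slice best none (some 240)
      | some k => k.2

-- ===== PRECONDITION & SPEC =====
-- Pre_ excludes only inputs where the first context dict has no "text" key: A raises KeyError there.
def Pre_answer_from_context (question : String) (contexts : List (List (String × String))) : Prop :=
  contexts.head?.all (fun c => (PySem.Dict.mk c).contains "text") = true
instance (question : String) (contexts : List (List (String × String))) : Decidable (Pre_answer_from_context question contexts) := by unfold Pre_answer_from_context; infer_instance

def pvWitness_answer_from_context : String × (List (List (String × String))) :=
  ("what is the cat", [[("text", "the cat sat. a dog ran."), ("id", "1")]])

def Spec_answer_from_context (question : String) (contexts : List (List (String × String))) (out : String) : Prop := out = answer_from_context_alt question contexts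
instance (question : String) (contexts : List (List (String × String))) (out : String) : Decidable (Spec_answer_from_context question contexts out) := by unfold Spec_answer_from_context; infer_instance

-- ===== CLAIM (what is proved, stated in full; the proofs are below) =====
def Claim_equal_answer_from_context : Prop := ∀ (question : String) (contexts : List (List (String × String))), Dom_answer_from_context question contexts → Pre_answer_from_context question contexts → Spec_answer_from_context question contexts (answer_from_context question contexts)

-- ===== LEMMAS AND PROOFS =====

lemma pvCount_foldl (p : String → Bool) (l : List String) : ∀ n : Int,
    l.foldl (fun n w => if p w then n + 1 else n) n = n + (l.filter p).length := by
  induction l with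
  | nil => intro n; simp
  | cons x xs ih =>
    intro n
    by_cases h : p x = true <;> simp [h, ih] <;> ring

lemma pvOverlap_eq (qT : PySem.Set String) (s : String) :
    pvOverlapB qT (PySem.Set.ofList (PySem.Str.split₀ (PySem.Str.lower s))) = pvOverlapA qT s := by
  unfold pvOverlapA pvOverlapB PySem.Set.len PySem.Set.inter
  rw [pvCount_foldl]
  have hf : List.filter (PySem.Set.ofList (PySem.Str.split₀ (PySem.Str.lower s))).contains qT
      = List.filter (fun x => decide (x ∈ PySem.Str.split₀ (PySem.Str.lower s))) qT := by
    apply List.filter_congr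
    intro x _
    simp [PySem.Set.contains]
  simp [hf]

lemma pvLt_eq (a b : Int × String) :
    (decide (a.1 < b.1) || (!decide (b.1 < a.1) && decide (a.2 < b.2))) = pvTupLt a b := by
  unfold pvTupLt
  rcases lt_trichotomy a.1 b.1 with h | h | h
  · simp [h]
  · simp [h]
  · simp [h, not_lt_of_gt h, ne_of_gt h]

def pvGStep (lt : (Int × String) → (Int × String) → Bool) :
    Option (Int × String) → (Int × String) → Option (Int × String) :=
  fun o x => match o with
  | none => some x
  | some y => if lt y x then some x else some y

lemma pvHead_insertBy (lt : (Int × String) → (Int × String) → Bool) (x : Int × String)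
    (ys : List (Int × String)) :
    (PySem.List.insertBy (fun a b => lt b a) x ys).head? = pvGStep lt ys.head? x := by
  cases ys with
  | nil => simp [PySem.List.insertBy, pvGStep]
  | cons y t =>
    simp only [PySem.List.insertBy, pvGStep, List.head?_cons]
    split <;> simp_all

lemma pvHead_foldl (lt : (Int × String) → (Int × String) → Bool) (xs : List (Int × String)) :
    ∀ acc : List (Int × String),
    (List.foldl (fun a x => PySem.List.insertBy (fun a b => lt b a) x a) acc xs).head?
      = List.foldl (pvGStep lt) acc.head? xs := by
  induction xs with
  | nil => intro acc; simp
  | cons x t ih =>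
    intro acc
    simp only [List.foldl_cons, ih, pvHead_insertBy]

lemma pvSorted2_head (xs : List (Int × String)) :
    (PySem.List.sorted2 xs Prod.fst Prod.snd true).head? = List.foldl pvBestStep none xs := by
  have h : PySem.List.sorted2 xs Prod.fst Prod.snd true
      = List.foldl (fun a x => PySem.List.insertBy
          (fun a b => decide (b.1 < a.1) || (!decide (a.1 < b.1) && decide (b.2 < a.2))) x a) [] xs := by
    simp [PySem.List.sorted2]
  rw [h, pvHead_foldl]
  have h2 : pvGStep (fun a b => decide (a.1 < b.1) || (!decide (b.1 < a.1) && decide (a.2 < b.2)))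
      = pvBestStep := by
    funext o x
    cases o with
    | none => rfl
    | some y =>
      show (if (decide (y.1 < x.1) || (!decide (x.1 < y.1) && decide (y.2 < x.2))) = true
              then some x else some y)
          = (if pvTupLt y x = true then some x else some y)
      rw [pvLt_eq]
  simp only [List.head?_nil]
  rw [h2]

lemma pvFoldl_best_some (xs : List (Int × String)) : ∀ b : Int × String,
    ∃ m, List.foldl pvBestStep (some b) xs = some m := by
  induction xs with
  | nil => intro b; exact ⟨b, rfl⟩
  | cons x t ih =>
    intro b
    simp only [List.foldl_cons, pvBestStep]
    split <;> apply ih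

lemma pvFoldl_strip (qT : PySem.Set String) (l : List String) :
    ∀ acc : Option (Int × String),
    List.foldl (fun acc raw =>
        let s := PySem.Str.strip raw
        if s = "" then acc
        else pvBestStep acc
          (pvOverlapB qT (PySem.Set.ofList (PySem.Str.split₀ (PySem.Str.lower s))), s)) acc l
    = List.foldl pvBestStep acc
        ((l.filterMap (fun s => let t := PySem.Str.strip s; if t = "" then none else some t)).map
          (fun t => (pvOverlapA qT t, t))) := by
  induction l with
  | nil => intro acc; rfl
  | cons x t ih =>
    intro acc
    by_cases h : PySem.Str.strip x = ""
    · simpa [h, pvOverlap_eq] using ih acc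
    · simpa [h, pvOverlap_eq] using
        ih (pvBestStep acc (pvOverlapA qT (PySem.Str.strip x), PySem.Str.strip x))

lemma pvBranch_eq (qT : PySem.Set String) (best : String) :
    (let sentences := ((PySem.Str.split? best ".").getD []).filterMap
        (fun s => let t := PySem.Str.strip s; if t = "" then none else some t)
     if sentences = [] then PySem.Str.slice best none (some 240)
     else
       match PySem.List.sorted2 (sentences.map (fun s => (pvOverlapA qT s, s))) Prod.fst Prod.snd true with
       | [] => ""
       | (_, s) :: _ => s)
    = (match ((PySem.Str.split? best ".").getD []).foldl
          (fun acc raw =>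
            let s := PySem.Str.strip raw
            if s = "" then acc
            else pvBestStep acc
              (pvOverlapB qT (PySem.Set.ofList (PySem.Str.split₀ (PySem.Str.lower s))), s)) none with
       | none => PySem.Str.slice best none (some 240)
       | some k => k.2) := by
  rw [pvFoldl_strip]
  generalize ((PySem.Str.split? best ".").getD []).filterMap
      (fun s => let t := PySem.Str.strip s; if t = "" then none else some t) = sentences
  cases sentences with
  | nil => simp
  | cons s t =>
    have hhead := pvSorted2_head ((s :: t).map (fun s => (pvOverlapA qT s, s)))
    obtain ⟨m, hm⟩ := pvFoldl_best_some (t.map (fun u => (pvOverlapA qT u, u))) (pvOverlapA qT s, s)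
    have hfold : List.foldl pvBestStep none ((s :: t).map (fun s => (pvOverlapA qT s, s))) = some m := by
      simpa [pvBestStep] using hm
    rw [hfold] at hhead
    rw [hfold]
    cases hs : PySem.List.sorted2 ((s :: t).map (fun s => (pvOverlapA qT s, s))) Prod.fst Prod.snd true with
    | nil => rw [hs] at hhead; simp at hhead
    | cons p l =>
      rw [hs] at hhead
      simp only [List.head?_cons, Option.some.injEq] at hhead
      subst hhead
      simp only [List.map_cons] at hs
      simp [hs]

-- ===== VERDICT (by name: the statement is the Claim_ definition above) =====
theorem answer_from_context_spec : Claim_equal_answer_from_context := by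
  intro question contexts _ hpre
  unfold Spec_answer_from_context
  cases contexts with
  | nil => rfl
  | cons c0 rest =>
    unfold Pre_answer_from_context at hpre
    simp only [List.head?_cons, Option.all_some] at hpre
    simp only [answer_from_context, answer_from_context_alt]
    cases hget : (PySem.Dict.mk c0).get? "text" with
    | none =>
      exfalso
      simp only [PySem.Dict.contains, PySem.Dict.get?, Option.map_eq_none_iff,
        List.find?_eq_none] at hpre hget
      obtain ⟨p, hp, hb⟩ := List.any_eq_true.mp hpre
      exact hget p hp hb
    | some best =>
      simpa using pvBranch_eq (PySem.Set.ofList (PySem.Str.split₀ (PySem.Str.lower question))) best
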